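-- pv_equiv track=rewrite | github.com/RyanPioneer/Leetcode | 2001~2500/2244. Minimum Rounds to Complete All Tasks/main.py | minimumRounds
-- ===== SOURCE A (Python) =====
-- from typing import List, Optional
-- from collections import defaultdict
--
-- def minimumRounds(tasks: List[int]) -> int:
--     dict, res = defaultdict(int), 0
--     for task in tasks:
--         dict[task] += 1
--
--     for level, num in dict.items():
--         if num == 1: return -1
--         if num%3 == 0: res += num//3
--         elif num%3 == 1:
--             res += (num-4)//3+2 if num != 4 else 2
--         else:
--             res += (num-2)//3+1
--
--     return res
-- ===== SOURCE B (Python) =====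
-- def minimumRounds(tasks):
--     s = sorted(tasks)
--     res, run, prev = 0, 0, None
--     for x in s:
--         if run > 0 and prev == x:
--             run += 1
--         else:
--             if run == 1:
--                 return -1
--             res += (run + 2) // 3
--             run, prev = 1, x
--     if run == 1:
--         return -1
--     return res + (run + 2) // 3
-- ===== Notes on version B (the rewrite author's own statement) =====
-- stated objective: alternative
-- what changed: Replaces the hash frequency table plus three-branch modulo arithmetic with sort-a-copy and a single pass over consecutive equal runs, adding ceil(run/3) = (run+2)//3 per run and returning -1 as soon as a run of length 1 closes.
import Mathlib
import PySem

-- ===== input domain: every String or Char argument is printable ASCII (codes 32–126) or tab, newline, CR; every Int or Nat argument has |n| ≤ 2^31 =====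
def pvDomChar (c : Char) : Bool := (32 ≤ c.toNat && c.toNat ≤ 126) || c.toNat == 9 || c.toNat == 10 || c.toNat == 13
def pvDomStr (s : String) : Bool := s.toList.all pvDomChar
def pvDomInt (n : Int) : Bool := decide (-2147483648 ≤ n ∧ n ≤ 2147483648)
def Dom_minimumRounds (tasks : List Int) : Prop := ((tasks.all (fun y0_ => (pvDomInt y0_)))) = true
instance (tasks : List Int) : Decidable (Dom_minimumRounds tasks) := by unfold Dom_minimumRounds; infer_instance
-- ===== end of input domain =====

-- B replaces A's hash frequency table + three-branch modulo arithmetic by sort-then-scan of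
-- consecutive equal runs, adding (run+2)//3 per run (alternative decomposition, not claimed faster).

-- ===== PORT A =====
-- the 'for level, num in dict.items()' loop with its early 'return -1'
def minimumRoundsLoop : List (Int × Int) → Int → Int
  | [], res => res
  | (_, num) :: rest, res =>
    if num == 1 then -1
    else if PySem.Int.mod num 3 == 0 then
      minimumRoundsLoop rest (res + PySem.Int.floordiv num 3)
    else if PySem.Int.mod num 3 == 1 then
      minimumRoundsLoop rest (res + (if num ≠ 4 then PySem.Int.floordiv (num - 4) 3 + 2 else 2))
    else
      minimumRoundsLoop rest (res + (PySem.Int.floordiv (num - 2) 3 + 1))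

def minimumRounds (tasks : List Int) : Int :=
  let d : PySem.Dict Int Int := tasks.foldl (fun d task => d.modify task 0 (· + 1)) PySem.Dict.empty
  minimumRoundsLoop d.items 0

-- ===== PORT B =====
-- the single pass over the sorted copy, tracking (res, run, prev)
def minimumRoundsAltLoop : List Int → Int → Int → Option Int → Int
  | [], res, run, _ => if run == 1 then -1 else res + PySem.Int.floordiv (run + 2) 3
  | x :: rest, res, run, prev =>
    if 0 < run ∧ prev = some x then minimumRoundsAltLoop rest res (run + 1) prev
    else if run == 1 then -1
    else minimumRoundsAltLoop rest (res + PySem.Int.floordiv (run + 2) 3) 1 (some x)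

def minimumRounds_alt (tasks : List Int) : Int :=
  minimumRoundsAltLoop (PySem.List.sorted tasks (fun x => x) false) 0 0 none

-- ===== PRECONDITION & SPEC =====
def Spec_minimumRounds (tasks : List Int) (out : Int) : Prop := out = minimumRounds_alt tasks
instance (tasks : List Int) (out : Int) : Decidable (Spec_minimumRounds tasks out) := by unfold Spec_minimumRounds; infer_instance

-- ===== CLAIM (what is proved, stated in full; the proofs are below) =====
def Claim_equal_minimumRounds : Prop := ∀ (tasks : List Int), Dom_minimumRounds tasks → Spec_minimumRounds tasks (minimumRounds tasks)

-- ===== LEMMAS AND PROOFS =====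

-- ceil(n/3) as Python computes it
def pvCeil3 (n : Int) : Int := PySem.Int.floordiv (n + 2) 3

-- the common reference value: counts read in a given key order
def pvRef (s : List Int) (keys : List Int) (res : Int) : Int :=
  if keys.any (fun k => ((s.count k : Int) == 1)) then -1
  else res + (keys.map (fun k => pvCeil3 (s.count k : Int))).sum

-- A's per-key addend is ceil(num/3), whatever branch fires
lemma pvAddend_mod0 (num : Int) (h : PySem.Int.mod num 3 = 0) :
    PySem.Int.floordiv num 3 = pvCeil3 num := by
  unfold pvCeil3
  rw [PySem.Int.mod_eq_emod_of_pos (by norm_num)] at h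
  rw [PySem.Int.floordiv_eq_ediv_of_pos (by norm_num), PySem.Int.floordiv_eq_ediv_of_pos (by norm_num)]
  omega

lemma pvAddend_mod1 (num : Int) (h : PySem.Int.mod num 3 = 1) :
    (if num ≠ 4 then PySem.Int.floordiv (num - 4) 3 + 2 else 2) = pvCeil3 num := by
  unfold pvCeil3
  rw [PySem.Int.mod_eq_emod_of_pos (by norm_num)] at h
  rw [PySem.Int.floordiv_eq_ediv_of_pos (by norm_num)]
  split_ifs with h4
  · rw [PySem.Int.floordiv_eq_ediv_of_pos (by norm_num)]; omega
  · have h4' : num = 4 := not_not.mp h4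
    subst h4'; decide
  
lemma pvAddend_mod2 (num : Int) (h0 : ¬ PySem.Int.mod num 3 = 0) (h1 : ¬ PySem.Int.mod num 3 = 1) :
    PySem.Int.floordiv (num - 2) 3 + 1 = pvCeil3 num := by
  unfold pvCeil3
  rw [PySem.Int.mod_eq_emod_of_pos (by norm_num)] at h0 h1
  rw [PySem.Int.floordiv_eq_ediv_of_pos (by norm_num), PySem.Int.floordiv_eq_ediv_of_pos (by norm_num)]
  omega

lemma pvAloop_eq (l : List (Int × Int)) (res : Int) :
    minimumRoundsLoop l res =
      if l.any (fun p => p.2 == 1) then -1 else res + (l.map (fun p => pvCeil3 p.2)).sum := by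
  induction l generalizing res with
  | nil => simp [minimumRoundsLoop]
  | cons p rest ih =>
    obtain ⟨k, num⟩ := p
    by_cases h1 : num = 1
    · simp [minimumRoundsLoop, h1]
    · have hstep : minimumRoundsLoop ((k, num) :: rest) res = minimumRoundsLoop rest (res + pvCeil3 num) := by
        by_cases hm0 : PySem.Int.mod num 3 = 0
        · simp only [minimumRoundsLoop]
          rw [if_neg (by simpa using h1), if_pos (by simpa using hm0), pvAddend_mod0 num hm0]
        · by_cases hm1 : PySem.Int.mod num 3 = 1
          · simp only [minimumRoundsLoop]
            rw [if_neg (by simpa using h1), if_neg (by simpa using hm0), if_pos (by simpa using hm1),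
              pvAddend_mod1 num hm1]
          · simp only [minimumRoundsLoop]
            rw [if_neg (by simpa using h1), if_neg (by simpa using hm0), if_neg (by simpa using hm1),
              pvAddend_mod2 num hm0 hm1]
      rw [hstep, ih]
      simp only [List.any_cons, List.map_cons, List.sum_cons]
      have hb : (num == 1) = false := by simpa using h1
      rw [hb]
      simp only [Bool.false_or]
      split_ifs with h
      · rfl
      · ring

lemma pvA_eq_ref (tasks : List Int) :
    minimumRounds tasks = pvRef tasks (PySem.Set.ofList tasks) 0 := by
  show minimumRoundsLoop (PySem.Dict.counter tasks).items 0 = _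
  rw [PySem.Dict.items_counter, pvAloop_eq, pvRef]
  simp [List.any_map, List.map_map, Function.comp_def]

-- B's reference recursion on the sorted list: first value, its whole count, then the rest
def pvBref : List Int → Int → Int
  | [], res => res
  | x :: t, res =>
    if (1 + (t.count x : Int)) = 1 then -1
    else pvBref (t.filter (fun y => y ≠ x)) (res + pvCeil3 (1 + (t.count x : Int)))
termination_by s _ => s.length
decreasing_by
  simp only [List.length_unattach]
  exact Nat.lt_succ_of_le (le_trans (List.length_filter_le _ _) (by simp))

lemma pvBloop_inv (s : List Int) :
    s.Pairwise (· ≤ ·) → ∀ (run p res : Int), 1 ≤ run → (∀ y ∈ s, p ≤ y) →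
    minimumRoundsAltLoop s res run (some p) =
      if run + (s.count p : Int) = 1 then -1
      else pvBref (s.filter (fun y => y ≠ p)) (res + pvCeil3 (run + (s.count p : Int))) := by
  induction s with
  | nil =>
    intro _ run p res hrun _
    simp only [minimumRoundsAltLoop, List.count_nil, List.filter_nil, Nat.cast_zero, add_zero]
    by_cases h : run = 1
    · rw [if_pos (by simpa using h), if_pos h]
    · rw [if_neg (by simpa using h), if_neg h, pvBref, pvCeil3]
  | cons x t ih =>
    intro hs run p res hrun hle
    have hxt : ∀ y ∈ t, x ≤ y := fun y hy => (List.pairwise_cons.mp hs).1 y hy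
    have hts : t.Pairwise (· ≤ ·) := (List.pairwise_cons.mp hs).2
    have hpx : p ≤ x := hle x (by simp)
    by_cases hxp : p = x
    · subst hxp
      have hstep : minimumRoundsAltLoop (p :: t) res run (some p) =
          minimumRoundsAltLoop t res (run + 1) (some p) := by
        simp only [minimumRoundsAltLoop]
        rw [if_pos (⟨by omega, trivial⟩ : 0 < run ∧ True)]
      rw [hstep, ih hts (run + 1) p res (by omega) hxt,
        List.count_cons_self, List.filter_cons_of_neg (by simp)]
      push_cast
      have harith : run + 1 + (t.count p : Int) = run + ((t.count p : Int) + 1) := by ring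
      rw [harith]
    · have hpt : p ∉ t := fun hmem => hxp (le_antisymm hpx (hxt p hmem))
      have hcount : (x :: t).count p = 0 := by
        rw [List.count_eq_zero]
        simp only [List.mem_cons, not_or]
        exact ⟨hxp, hpt⟩
      have hfilter : (x :: t).filter (fun y => y ≠ p) = x :: t := by
        rw [List.filter_eq_self]
        intro a ha
        simp only [ne_eq, decide_eq_true_eq]
        intro hap
        subst hap
        rcases List.mem_cons.mp ha with h | h
        · exact hxp h
        · exact hpt h
      have hstep : minimumRoundsAltLoop (x :: t) res run (some p) =
          if run == 1 then -1
          else minimumRoundsAltLoop t (res + PySem.Int.floordiv (run + 2) 3) 1 (some x) := by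
        simp only [minimumRoundsAltLoop]
        rw [if_neg (by rintro ⟨-, h⟩; exact hxp (Option.some.inj h))]
      rw [hstep, hcount, hfilter]
      simp only [Nat.cast_zero, add_zero]
      by_cases hr1 : run = 1
      · rw [if_pos (by simpa using hr1), if_pos hr1]
      · rw [if_neg (by simpa using hr1), if_neg hr1,
          ih hts 1 x (res + PySem.Int.floordiv (run + 2) 3) le_rfl hxt, pvBref]
        rfl

lemma pvB_eq_Bref (s : List Int) (hs : s.Pairwise (· ≤ ·)) :
    minimumRoundsAltLoop s 0 0 none = pvBref s 0 := by
  cases s with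
  | nil => rw [pvBref]; decide
  | cons x t =>
    have hxt : ∀ y ∈ t, x ≤ y := fun y hy => (List.pairwise_cons.mp hs).1 y hy
    have hts : t.Pairwise (· ≤ ·) := (List.pairwise_cons.mp hs).2
    have hstep : minimumRoundsAltLoop (x :: t) 0 0 none =
        minimumRoundsAltLoop t (0 + PySem.Int.floordiv (0 + 2) 3) 1 (some x) := by
      simp only [minimumRoundsAltLoop]
      rw [if_neg (by rintro ⟨h, -⟩; omega), if_neg (by decide)]
    rw [hstep, pvBloop_inv t hts 1 x _ le_rfl hxt, pvBref]
    have h0 : (0 : Int) + PySem.Int.floordiv (0 + 2) 3 = 0 := by decide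
    rw [h0]

lemma pvFoldl_add_skip (x : Int) (l : List Int) :
    ∀ (acc : PySem.Set Int), x ∈ acc →
    l.foldl PySem.Set.add acc = (l.filter (fun y => y ≠ x)).foldl PySem.Set.add acc := by
  induction l with
  | nil => intro acc _; rfl
  | cons y l ih =>
    intro acc hx
    by_cases hy : y = x
    · subst hy
      have hadd : PySem.Set.add acc y = acc := by
        simp only [PySem.Set.add]
        rw [if_pos (by simpa [PySem.Set.contains] using hx)]
      rw [List.filter_cons_of_neg (by simp), List.foldl_cons, hadd, ih acc hx]
    · rw [List.filter_cons_of_pos (by simp [hy]), List.foldl_cons, List.foldl_cons,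
        ih _ ((PySem.Set.mem_add acc y x).mpr (Or.inl hx))]

lemma pvFoldl_add_cons (l : List Int) (x : Int) :
    ∀ (s : List Int), x ∉ l →
    l.foldl PySem.Set.add (x :: s) = x :: l.foldl PySem.Set.add s := by
  induction l with
  | nil => intro s _; rfl
  | cons y l ih =>
    intro s hx
    have hyx : ¬ (y == x) := by simpa using fun h => hx (by simp [h])
    have hadd : PySem.Set.add (x :: s) y = x :: PySem.Set.add s y := by
      have hc : PySem.Set.contains (x :: s) y = PySem.Set.contains s y := by
        have hyx' : y ≠ x := by simpa using hyx
        simp only [PySem.Set.contains, List.elem_cons]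
        rw [show (y == x) = false by simpa using hyx']
      simp only [PySem.Set.add, hc]
      split_ifs <;> simp
    rw [List.foldl_cons, List.foldl_cons, hadd, ih _ (fun h => hx (by simp [h]))]

lemma pvOfList_cons_filter (x : Int) (t : List Int) :
    PySem.Set.ofList (x :: t) = x :: PySem.Set.ofList (t.filter (fun y => y ≠ x)) := by
  have h1 : PySem.Set.ofList (x :: t) = t.foldl PySem.Set.add [x] := by
    rw [PySem.Set.ofList_eq_foldl, List.foldl_cons]
    rfl
  rw [h1, pvFoldl_add_skip x t [x] (by simp),
    pvFoldl_add_cons _ x [] (by simp), PySem.Set.ofList_eq_foldl]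

lemma pvBref_eq_ref : ∀ (n : Nat) (s : List Int), s.length = n →
    ∀ res, pvBref s res = pvRef s (PySem.Set.ofList s) res := by
  intro n
  induction n using Nat.strong_induction_on with
  | _ n ih =>
    intro s hlen res
    cases s with
    | nil => rw [pvBref]; simp [pvRef, PySem.Set.ofList]
    | cons x t =>
      rw [pvBref, pvOfList_cons_filter, pvRef]
      simp only [List.any_cons, List.map_cons, List.sum_cons, List.count_cons_self]
      have hmem : ∀ k ∈ PySem.Set.ofList (t.filter (fun y => y ≠ x)), k ≠ x ∧ k ∈ t := by
        intro k hk
        rw [PySem.Set.mem_ofList, List.mem_filter] at hk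
        exact ⟨by simpa using hk.2, hk.1⟩
      have hcnt : ∀ k ∈ PySem.Set.ofList (t.filter (fun y => y ≠ x)),
          List.count k (t.filter (fun y => y ≠ x)) = List.count k (x :: t) := by
        intro k hk
        have hkx : ¬ x = k := fun h => (hmem k hk).1 h.symm
        rw [List.count_filter (by simp [(hmem k hk).1])]
        simp [hkx]
      have hlen' : (t.filter (fun y => y ≠ x)).length < n := by
        have h1 : (t.filter (fun y => y ≠ x)).length ≤ t.length := List.length_filter_le _ _
        have h2 : t.length + 1 = n := by simpa using hlen
        omega
      rw [show (1 : Int) + (List.count x t : Int) = ((List.count x t + 1 : Nat) : Int) by push_cast; ring]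
      by_cases hc : List.count x t = 0
      · rw [if_pos (by rw [hc]; norm_num)]
        simp [hc]
      · rw [if_neg (by push_cast; omega),
          show (((List.count x t + 1 : Nat) : Int) == 1) = false by
            simp only [beq_eq_false_iff_ne, ne_eq]
            push_cast
            omega]
        simp only [Bool.false_or]
        rw [ih _ hlen' _ rfl, pvRef,
          PySem.List.any_congr_mem (fun k hk => by rw [hcnt k hk]),
          List.map_congr_left (fun k hk => by rw [hcnt k hk])]
        split_ifs with h
        · rfl
        · ring

lemma pvRef_perm (s tasks : List Int) (hperm : s.Perm tasks) :
    pvRef s (PySem.Set.ofList s) 0 = pvRef tasks (PySem.Set.ofList tasks) 0 := by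
  have hkeys : (PySem.Set.ofList s).Perm (PySem.Set.ofList tasks) := by
    rw [List.perm_ext_iff_of_nodup (PySem.Set.nodup_ofList _) (PySem.Set.nodup_ofList _)]
    intro a
    rw [PySem.Set.mem_ofList, PySem.Set.mem_ofList]
    exact hperm.mem_iff
  unfold pvRef
  simp only [hperm.count_eq]
  rw [List.Perm.any_eq hkeys, (hkeys.map _).sum_eq]

-- ===== VERDICT (by name: the statement is the Claim_ definition above) =====
theorem minimumRounds_spec : Claim_equal_minimumRounds := by
  intro tasks _
  unfold Spec_minimumRounds
  have hperm : (PySem.List.sorted tasks (fun x => x) false).Perm tasks := PySem.List.sorted_perm _ _ _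
  have hsorted : (PySem.List.sorted tasks (fun x => x) false).Pairwise (· ≤ ·) := by
    simpa using PySem.List.sorted_pairwise tasks (fun x => x)
  rw [pvA_eq_ref, minimumRounds_alt, pvB_eq_Bref _ hsorted, pvBref_eq_ref _ _ rfl, pvRef_perm _ _ hperm]
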